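-- pv_equiv track=rewrite | github.com/alegilje/MGA_RevitTools | Test.extension/Test.Tab/Test.panel/Dimensionline_clean.pushbutton/kladd.py | build_overlap_clusters
-- ===== SOURCE A (Python) =====
-- def build_overlap_clusters(items):
--     """Return list of clusters of overlapping [x0,x1] intervals (sorted along dim line)."""
--     its = sorted(items, key=lambda it: it["x0"])
--     clusters = []
--     cur = []
--     cur_max = None
--
--     for it in its:
--         if not cur:
--             cur = [it]
--             cur_max = it["x1"]
--             continue
--
--         # overlap test: start before current cluster end
--         if it["x0"] < cur_max:
--             cur.append(it)
--             cur_max = max(cur_max, it["x1"])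
--         else:
--             clusters.append(cur)
--             cur = [it]
--             cur_max = it["x1"]
--
--     if cur:
--         clusters.append(cur)
--     return clusters
-- ===== SOURCE B (Python) =====
-- def build_overlap_clusters(items):
--     """Two-pass variant: boundary flags from the global prefix max of x1, then grouping."""
--     its = sorted(items, key=lambda it: it["x0"])
--     # pass 1: an item starts a new cluster iff its x0 reaches the running max of all x1 seen so far
--     flags = []
--     running = None
--     for it in its:
--         flags.append(running is None or it["x0"] >= running)
--         running = it["x1"] if running is None else max(running, it["x1"])
--     # pass 2: split the sorted list at the flagged boundaries
--     clusters = []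
--     for flag, it in zip(flags, its):
--         if flag:
--             clusters.append([it])
--         else:
--             clusters[-1].append(it)
--     return clusters
-- ===== Notes on version B (the rewrite author's own statement) =====
-- stated objective: alternative
-- what changed: Replaces A's single greedy fold carrying (current cluster, cluster-local max) by two separate passes over the sorted list: pass 1 computes a boundary flag per item from the global prefix maximum of x1, pass 2 splits the list at the flagged boundaries; correctness rests on the proved fact that on a sorted list the cluster-local max and the global prefix max induce the same boundaries.
import Mathlib
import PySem

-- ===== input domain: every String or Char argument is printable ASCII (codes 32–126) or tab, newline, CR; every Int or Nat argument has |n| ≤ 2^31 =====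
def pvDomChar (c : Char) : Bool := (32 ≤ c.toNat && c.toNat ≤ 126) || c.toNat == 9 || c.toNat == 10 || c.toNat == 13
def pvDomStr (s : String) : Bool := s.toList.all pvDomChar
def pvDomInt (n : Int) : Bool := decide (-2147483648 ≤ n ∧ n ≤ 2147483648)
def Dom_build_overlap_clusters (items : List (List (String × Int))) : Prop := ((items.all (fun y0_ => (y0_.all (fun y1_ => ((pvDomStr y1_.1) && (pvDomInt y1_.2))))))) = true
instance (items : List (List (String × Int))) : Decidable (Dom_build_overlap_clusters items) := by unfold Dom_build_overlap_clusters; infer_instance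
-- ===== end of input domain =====

-- B replaces the single greedy fold by two passes (boundary flags from the global prefix max of x1, then grouping); objective: alternative decomposition.
-- Pre_ excludes items lacking an "x0" or "x1" key, on which A raises KeyError.


-- ===== PORT A =====
-- it["x0"] / it["x1"]: first-match association-list lookup; default 0 is reached only outside Pre_ (Python raises KeyError there)
def pvX0 (it : List (String × Int)) : Int := (it.lookup "x0").getD 0
def pvX1 (it : List (String × Int)) : Int := (it.lookup "x1").getD 0

-- the loop body of A, on state (clusters, cur, cur_max)
def pvStepA (st : List (List (List (String × Int))) × List (List (String × Int)) × Option Int)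
    (it : List (String × Int)) :
    List (List (List (String × Int))) × List (List (String × Int)) × Option Int :=
  match st with
  | (clusters, cur, curmax) =>
    if cur = [] then (clusters, [it], some (pvX1 it))
    else if pvX0 it < curmax.getD 0 then
      (clusters, cur ++ [it], some (max (curmax.getD 0) (pvX1 it)))
    else (clusters ++ [cur], [it], some (pvX1 it))

def build_overlap_clusters (items : List (List (String × Int))) : List (List (List (String × Int))) :=
  let its := PySem.List.sorted items (fun it => pvX0 it) false
  let st := its.foldl pvStepA ([], [], none)
  if st.2.1 = [] then st.1 else st.1 ++ [st.2.1]

-- ===== PORT B =====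
-- pass 1 of B: boundary flags from the global running max of x1
def pvFlags (running : Option Int) : List (List (String × Int)) → List Bool
  | [] => []
  | it :: t =>
    (running.isNone || decide (running.getD 0 ≤ pvX0 it)) ::
      pvFlags (some (match running with | none => pvX1 it | some r => max r (pvX1 it))) t

-- pass 2 of B: clusters.append([it]) / clusters[-1].append(it)
def pvGroup (clusters : List (List (List (String × Int)))) :
    List (Bool × List (String × Int)) → List (List (List (String × Int)))
  | [] => clusters
  | (f, it) :: t =>
    if f then pvGroup (clusters ++ [[it]]) t
    else pvGroup (clusters.dropLast ++ [(clusters.getLast?.getD []) ++ [it]]) t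

def build_overlap_clusters_alt (items : List (List (String × Int))) : List (List (List (String × Int))) :=
  let its := PySem.List.sorted items (fun it => pvX0 it) false
  pvGroup [] ((pvFlags none its).zip its)

-- ===== PRECONDITION & SPEC =====
-- Pre_ excludes exactly the inputs where some item lacks an "x0" or "x1" key: A raises KeyError there.
def Pre_build_overlap_clusters (items : List (List (String × Int))) : Prop :=
  (items.all (fun it => (it.lookup "x0").isSome && (it.lookup "x1").isSome)) = true
instance (items : List (List (String × Int))) : Decidable (Pre_build_overlap_clusters items) := by
  unfold Pre_build_overlap_clusters; infer_instance

def pvWitness_build_overlap_clusters : (List (List (String × Int))) :=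
  [[("x0", 0), ("x1", 5)], [("x0", 3), ("x1", 4)], [("x0", 9), ("x1", 11)]]

def Spec_build_overlap_clusters (items : List (List (String × Int))) (out : List (List (List (String × Int)))) : Prop := out = build_overlap_clusters_alt items
instance (items : List (List (String × Int))) (out : List (List (List (String × Int)))) : Decidable (Spec_build_overlap_clusters items out) := by unfold Spec_build_overlap_clusters; infer_instance

-- ===== CLAIM (what is proved, stated in full; the proofs are below) =====
def Claim_equal_build_overlap_clusters : Prop := ∀ (items : List (List (String × Int))), Dom_build_overlap_clusters items → Pre_build_overlap_clusters items → Spec_build_overlap_clusters items (build_overlap_clusters items)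

-- ===== LEMMAS AND PROOFS =====

-- canonical recursion carrying the CLUSTER-LOCAL max (A's shape)
def pvGo (acc : List (List (String × Int))) (m : Int) :
    List (List (String × Int)) → List (List (List (String × Int)))
  | [] => [acc]
  | it :: t =>
    if pvX0 it < m then pvGo (acc ++ [it]) (max m (pvX1 it)) t
    else acc :: pvGo [it] (pvX1 it) t

-- canonical recursion carrying the GLOBAL prefix max (B's shape)
def pvGoG (acc : List (List (String × Int))) (g : Int) :
    List (List (String × Int)) → List (List (List (String × Int)))
  | [] => [acc]
  | it :: t =>
    if pvX0 it < g then pvGoG (acc ++ [it]) (max g (pvX1 it)) t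
    else acc :: pvGoG [it] (max g (pvX1 it)) t

def pvFinA (st : List (List (List (String × Int))) × List (List (String × Int)) × Option Int) :
    List (List (List (String × Int))) :=
  if st.2.1 = [] then st.1 else st.1 ++ [st.2.1]

lemma pvA_fold (l : List (List (String × Int))) :
    ∀ (clusters : List (List (List (String × Int)))) (acc : List (List (String × Int))) (m : Int),
      acc ≠ [] →
      pvFinA (l.foldl pvStepA (clusters, acc, some m)) = clusters ++ pvGo acc m l := by
  induction l with
  | nil =>
    intro clusters acc m hacc
    simp [pvFinA, pvGo, hacc]
  | cons it t ih =>
    intro clusters acc m hacc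
    by_cases h : pvX0 it < m
    · rw [List.foldl_cons,
        show pvStepA (clusters, acc, some m) it = (clusters, acc ++ [it], some (max m (pvX1 it)))
          from by simp [pvStepA, hacc, h],
        ih _ _ _ (by simp)]
      simp [pvGo, h]
    · rw [List.foldl_cons,
        show pvStepA (clusters, acc, some m) it = (clusters ++ [acc], [it], some (pvX1 it))
          from by simp [pvStepA, hacc, h],
        ih _ _ _ (by simp)]
      simp [pvGo, h]

lemma pvB_group (l : List (List (String × Int))) :
    ∀ (clusters : List (List (List (String × Int)))) (acc : List (List (String × Int))) (g : Int),
      pvGroup (clusters ++ [acc]) ((pvFlags (some g) l).zip l) = clusters ++ pvGoG acc g l := by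
  induction l with
  | nil => intro clusters acc g; simp [pvFlags, pvGroup, pvGoG]
  | cons it t ih =>
    intro clusters acc g
    simp only [pvFlags, Option.isNone_some, Option.getD_some, Bool.false_or, List.zip_cons_cons,
      pvGroup, pvGoG]
    by_cases h : pvX0 it < g
    · rw [if_neg (by simpa using not_le.mpr h), if_pos h]
      rw [List.dropLast_concat, List.getLast?_concat, Option.getD_some, ih]
    · rw [if_pos (by simpa using not_lt.mp h), if_neg h]
      have : clusters ++ [acc] ++ [[it]] = (clusters ++ [acc]) ++ [[it]] := by simp
      rw [this, ih]
      simp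

lemma pvGo_eq_pvGoG (l : List (List (String × Int))) :
    ∀ (acc : List (List (String × Int))) (m g : Int),
      l.Pairwise (fun a b => pvX0 a ≤ pvX0 b) →
      m ≤ g → (∀ it ∈ l, pvX0 it < g → pvX0 it < m) →
      pvGo acc m l = pvGoG acc g l := by
  induction l with
  | nil => intro acc m g _ _ _; rfl
  | cons it t ih =>
    intro acc m g hpw hmg hinv
    have hpw' := (List.pairwise_cons.mp hpw).2
    have hhd := (List.pairwise_cons.mp hpw).1
    simp only [pvGo, pvGoG]
    by_cases h : pvX0 it < m
    · rw [if_pos h, if_pos (lt_of_lt_of_le h hmg)]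
      exact ih _ _ _ hpw' (by omega) (by
        intro jt hjt hlt
        rcases lt_or_ge (pvX0 jt) g with hg | hg
        · have := hinv jt (by simp [hjt]) hg; omega
        · omega)
    · have hgle : ¬ pvX0 it < g := fun hlt => h (hinv it (by simp) hlt)
      rw [if_neg h, if_neg hgle]
      congr 1
      exact ih _ _ _ hpw' (by omega) (by
        intro jt hjt hlt
        have := hhd jt hjt
        omega)

theorem pv_main (items : List (List (String × Int))) :
    build_overlap_clusters items = build_overlap_clusters_alt items := by
  unfold build_overlap_clusters build_overlap_clusters_alt
  have hpw := PySem.List.sorted_pairwise items (fun it => pvX0 it)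
  cases hs : PySem.List.sorted items (fun it => pvX0 it) false with
  | nil => simp [pvFlags, pvGroup]
  | cons h t =>
    rw [hs] at hpw
    have hpwt := (List.pairwise_cons.mp hpw).2
    dsimp only
    rw [List.foldl_cons,
      show pvStepA ([], [], none) h = ([], [h], some (pvX1 h)) from by simp [pvStepA]]
    have hA := pvA_fold t [] [h] (pvX1 h) (by simp)
    simp only [pvFinA, List.nil_append] at hA
    rw [hA]
    simp only [pvFlags, Option.isNone_none, Bool.true_or, List.zip_cons_cons, pvGroup, if_true, List.nil_append]
    have hB := pvB_group t [] [h] (pvX1 h)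
    simp only [List.nil_append] at hB
    rw [hB]
    exact pvGo_eq_pvGoG t [h] (pvX1 h) (pvX1 h) hpwt le_rfl (fun _ _ h => h)

-- ===== VERDICT (by name: the statement is the Claim_ definition above) =====
theorem build_overlap_clusters_spec : Claim_equal_build_overlap_clusters := by
  intro items _ _
  unfold Spec_build_overlap_clusters
  exact pv_main items
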